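-- pv_equiv track=rewrite | github.com/hhuuson97/English-learning | source/utils/algorithm.py | longest_common_words
-- ===== SOURCE A (Python) =====
-- def longest_common_words(arr1, arr2):
--     m = len(arr1)
--     n = len(arr2)
--
--     dp = [[[] for _ in range(n + 1)] for _ in range(m + 1)]
--     for i in range(1, m+1):
--         for j in range(1, n+1):
--             if arr1[i-1][2] == arr2[j-1][2]:
--                 dp[i][j] = list(dp[i - 1][j - 1]) + [arr1[i-1][2]]
--             else:
--                 if len(dp[i][j-1]) > len(dp[i-1][j]):
--                     dp[i][j] = list(dp[i][j-1])
--                 else: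
--                     dp[i][j] = list(dp[i-1][j])
--     no_matches = []
--     i = 0
--     for w in arr1:
--         if i < len(dp[m][n]) and dp[m][n][i] == w[2]:
--             i += 1
--         else:
--             no_matches.append(w)
--     return dp[m][n], no_matches
-- ===== SOURCE B (Python) =====
-- def longest_common_words(arr1, arr2):
--     m, n = len(arr1), len(arr2)
--     # length-only DP table instead of A's table of lists
--     L = [[0] * (n + 1) for _ in range(m + 1)]
--     for i in range(1, m + 1):
--         for j in range(1, n + 1):
--             if arr1[i - 1][2] == arr2[j - 1][2]:
--                 L[i][j] = L[i - 1][j - 1] + 1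
--             else:
--                 L[i][j] = L[i][j - 1] if L[i][j - 1] > L[i - 1][j] else L[i - 1][j]
--     # single backtrack reconstructs the same sequence A materialises cell by cell
--     lcs = []
--     i, j = m, n
--     while i > 0 and j > 0:
--         if arr1[i - 1][2] == arr2[j - 1][2]:
--             lcs.append(arr1[i - 1][2])
--             i -= 1
--             j -= 1
--         elif L[i][j - 1] > L[i - 1][j]:
--             j -= 1
--         else:
--             i -= 1
--     lcs.reverse()
--     no_matches = []
--     k = 0
--     for w in arr1:
--         if k < len(lcs) and lcs[k] == w[2]:
--             k += 1
--         else: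
--             no_matches.append(w)
--     return lcs, no_matches
-- ===== Notes on version B (the rewrite author's own statement) =====
-- stated objective: faster
-- what changed: A materialises a full list-of-strings LCS table (copying a candidate subsequence into every DP cell); B keeps a length-only integer DP table and reconstructs the sequence once by backtracking with the same tie-break, then runs the same unmatched-words scan.
import Mathlib
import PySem

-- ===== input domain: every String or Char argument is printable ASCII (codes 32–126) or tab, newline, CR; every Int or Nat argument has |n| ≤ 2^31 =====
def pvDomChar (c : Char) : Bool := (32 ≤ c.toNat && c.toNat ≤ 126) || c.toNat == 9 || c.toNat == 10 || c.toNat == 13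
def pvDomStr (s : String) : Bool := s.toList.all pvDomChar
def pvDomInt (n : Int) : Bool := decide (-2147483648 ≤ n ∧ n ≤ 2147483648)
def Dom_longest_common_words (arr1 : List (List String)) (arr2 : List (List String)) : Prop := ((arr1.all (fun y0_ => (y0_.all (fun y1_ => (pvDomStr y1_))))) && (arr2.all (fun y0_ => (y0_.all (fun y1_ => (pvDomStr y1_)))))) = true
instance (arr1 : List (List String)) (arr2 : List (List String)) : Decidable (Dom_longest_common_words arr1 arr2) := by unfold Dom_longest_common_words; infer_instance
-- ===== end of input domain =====

-- B replaces A's O(m*n)-cells-of-lists LCS table by a length-only DP table plus one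
-- backtrack pass reconstructing the same sequence (same tie-break); asymptotically faster.

-- ===== PORT A =====
-- w[2]  (Python raises IndexError on shorter lists; Pre_ excludes the raising inputs, so the .getD "" default is never observed)
def pvKeyA (w : List String) : String := (PySem.List.pyGet? w 2).getD ""

-- inner loop 'for j in range(1, n+1)': walks the remaining keys of arr2; pd = dp[i-1][j-1], prest = dp[i-1][j..], cur = dp[i][j-1]
def pvRowA (a : String) : List String → List String → List (List String) → List String → List (List String)
  | [], _, _, _ => []
  | b :: ks, pd, prest, cur =>
    let e := if a = b then pd ++ [a]
             else if cur.length > (prest.headD []).length then cur else prest.headD []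
    e :: pvRowA a ks (prest.headD []) prest.tail e

-- outer loop 'for i in range(1, m+1)': prev is row i-1 of dp (indices 0..n); returns the final row dp[m]
def pvLastRowA (k2 : List String) : List String → List (List String) → List (List String)
  | [], prev => prev
  | a :: k1, prev => pvLastRowA k2 k1 ([] :: pvRowA a k2 (prev.headD []) prev.tail [])

-- final loop building no_matches; 'i < len(lcs) and lcs[i] == w[2]' short-circuits, matched by get?
def pvScanA (lcs : List String) : List (List String) → Nat → List (List String)
  | [], _ => []
  | w :: ws, i => if lcs[i]? = some (pvKeyA w) then pvScanA lcs ws (i + 1) else w :: pvScanA lcs ws i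

def longest_common_words (arr1 : List (List String)) (arr2 : List (List String)) : List String × List (List String) :=
  let k1 := arr1.map pvKeyA
  let k2 := arr2.map pvKeyA
  let lastRow := pvLastRowA k2 k1 (List.replicate (k2.length + 1) [])
  let lcs := (PySem.List.pyGet? lastRow (Int.ofNat k2.length)).getD []   -- dp[m][n]
  (lcs, pvScanA lcs arr1 0)

-- ===== PORT B =====
def pvKeyB (w : List String) : String := (PySem.List.pyGet? w 2).getD ""

-- inner loop of B's length-only DP: pd = L[i-1][j-1], prest = L[i-1][j..], cur = L[i][j-1]
def pvLRowB (a : String) : List String → Nat → List Nat → Nat → List Nat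
  | [], _, _, _ => []
  | b :: ks, pd, prest, cur =>
    let e := if a = b then pd + 1
             else if cur > prest.headD 0 then cur else prest.headD 0
    e :: pvLRowB a ks (prest.headD 0) prest.tail e

-- outer loop: acc holds the rows built so far, most recent first (B keeps the whole table L)
def pvRowsB (k2 : List String) : List String → List (List Nat) → List (List Nat)
  | [], acc => acc
  | a :: k1, acc =>
    let prev := acc.headD []
    pvRowsB k2 k1 ((0 :: pvLRowB a k2 (prev.headD 0) prev.tail 0) :: acc)

-- 'while i > 0 and j > 0' backtrack; produces the lcs in append order (reversed at the end, as in B)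
def pvBackB (k1 k2 : List String) (rows : List (List Nat)) : Nat → Nat → List String
  | 0, _ => []
  | _ + 1, 0 => []
  | i + 1, j + 1 =>
    if k1.getD i "" = k2.getD j "" then k1.getD i "" :: pvBackB k1 k2 rows i j
    else if ((rows.getD (i + 1) []).getD j 0) > ((rows.getD i []).getD (j + 1) 0) then
      pvBackB k1 k2 rows (i + 1) j
    else
      pvBackB k1 k2 rows i (j + 1)
  termination_by i j => i + j

def pvScanB (lcs : List String) : List (List String) → Nat → List (List String)
  | [], _ => []
  | w :: ws, i => if lcs[i]? = some (pvKeyB w) then pvScanB lcs ws (i + 1) else w :: pvScanB lcs ws i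

def longest_common_words_alt (arr1 : List (List String)) (arr2 : List (List String)) : List String × List (List String) :=
  let m := arr1.length
  let n := arr2.length
  let k1 := arr1.map pvKeyB
  let k2 := arr2.map pvKeyB
  let rows := (pvRowsB k2 k1 [List.replicate (n + 1) 0]).reverse
  let lcs := (pvBackB k1 k2 rows m n).reverse
  (lcs, pvScanB lcs arr1 0)

-- ===== PRECONDITION & SPEC =====
-- Pre_ excludes exactly the inputs where Python A raises IndexError: some inner list shorter
-- than 3 while both arrays are nonempty (with either array empty neither program indexes w[2]).
def Pre_longest_common_words (arr1 : List (List String)) (arr2 : List (List String)) : Prop :=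
  arr1 = [] ∨ arr2 = [] ∨ ((∀ w ∈ arr1, 3 ≤ w.length) ∧ (∀ w ∈ arr2, 3 ≤ w.length))
instance (arr1 : List (List String)) (arr2 : List (List String)) : Decidable (Pre_longest_common_words arr1 arr2) := by unfold Pre_longest_common_words; infer_instance
def pvWitness_longest_common_words : List (List String) × List (List String) :=
  ([["a", "n1", "cat"], ["b", "n2", "dog"]], [["c", "n3", "dog"], ["d", "n4", "cat"]])

def Spec_longest_common_words (arr1 : List (List String)) (arr2 : List (List String)) (out : List String × List (List String)) : Prop := out = longest_common_words_alt arr1 arr2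
instance (arr1 : List (List String)) (arr2 : List (List String)) (out : List String × List (List String)) : Decidable (Spec_longest_common_words arr1 arr2 out) := by unfold Spec_longest_common_words; infer_instance

-- ===== CLAIM (what is proved, stated in full; the proofs are below) =====
def Claim_equal_longest_common_words : Prop := ∀ (arr1 : List (List String)) (arr2 : List (List String)), Dom_longest_common_words arr1 arr2 → Pre_longest_common_words arr1 arr2 → Spec_longest_common_words arr1 arr2 (longest_common_words arr1 arr2)

-- ===== LEMMAS AND PROOFS =====

-- reference recurrence: pvADP k1 k2 i j is A's dp[i][j] (keys k1 = arr1.map pvKeyA, k2 = arr2.map pvKeyA)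
def pvADP (k1 k2 : List String) : Nat → Nat → List String
  | 0, _ => []
  | _ + 1, 0 => []
  | i + 1, j + 1 =>
    if k1.getD i "" = k2.getD j "" then pvADP k1 k2 i j ++ [k1.getD i ""]
    else if (pvADP k1 k2 (i + 1) j).length > (pvADP k1 k2 i (j + 1)).length then pvADP k1 k2 (i + 1) j
    else pvADP k1 k2 i (j + 1)
  termination_by i j => i + j

-- row i of B's length table, as lengths of A's dp entries
def pvLRow (k1 k2 : List String) (i : Nat) : List Nat :=
  (List.range (k2.length + 1)).map (fun j => (pvADP k1 k2 i j).length)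

theorem pvADP_zero_left (k1 k2 : List String) (j : Nat) : pvADP k1 k2 0 j = [] := by
  simp [pvADP]
theorem pvADP_zero_right (k1 k2 : List String) (i : Nat) : pvADP k1 k2 i 0 = [] := by
  cases i <;> simp [pvADP]
theorem pvDropCons {α : Type} (d : α) (k2 : List α) (j0 : Nat) (b : α) (ks : List α)
    (h : b :: ks = k2.drop j0) : k2.getD j0 d = b ∧ ks = k2.drop (j0 + 1) := by
  constructor
  · have h0 : k2[j0]? = some b := by
      have : (List.drop j0 k2)[0]? = k2[j0 + 0]? := List.getElem?_drop
      rw [← h] at this; simpa using this.symm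
    simp [List.getD_eq_getElem?_getD, h0]
  · have := congrArg (List.drop 1) h
    simpa [List.drop_drop] using this

theorem pvRowA_spec (k1 k2 : List String) (i : Nat) :
    ∀ (ks : List String) (j0 : Nat) (pd : List String) (prest : List (List String)) (cur : List String),
      ks = k2.drop j0 →
      pd = pvADP k1 k2 i j0 →
      prest = (List.range ks.length).map (fun t => pvADP k1 k2 i (j0 + 1 + t)) →
      cur = pvADP k1 k2 (i + 1) j0 →
      pvRowA (k1.getD i "") ks pd prest cur
        = (List.range ks.length).map (fun t => pvADP k1 k2 (i + 1) (j0 + 1 + t)) := by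
  intro ks
  induction ks with
  | nil => intro j0 pd prest cur _ _ _ _; simp [pvRowA]
  | cons b ks ih =>
    intro j0 pd prest cur hks hpd hprest hcur
    obtain ⟨hb, hks'⟩ := pvDropCons "" k2 j0 b ks hks
    have hhead : prest.headD [] = pvADP k1 k2 i (j0 + 1) := by
      subst hprest; simp [List.length_cons, List.range_succ_eq_map]
    have htail : prest.tail = (List.range ks.length).map (fun t => pvADP k1 k2 i ((j0 + 1) + 1 + t)) := by
      subst hprest
      simp only [List.length_cons, List.range_succ_eq_map, List.map_map, List.map_cons, List.tail_cons]
      apply List.map_congr_left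
      intro t _
      simp only [Function.comp_apply]
      congr 1
      omega
    have he : (if k1.getD i "" = b then pd ++ [k1.getD i ""]
        else if cur.length > (prest.headD []).length then cur else prest.headD [])
        = pvADP k1 k2 (i + 1) (j0 + 1) := by
      rw [pvADP, hb, hpd, hcur, hhead]
    simp only [pvRowA, List.length_cons, List.range_succ_eq_map, List.map_cons, List.map_map]
    refine List.cons_eq_cons.mpr ⟨by simpa using he, ?_⟩
    rw [ih (j0 + 1) (prest.headD []) prest.tail _ hks' hhead htail (by rw [he])]
    apply List.map_congr_left
    intro t _
    simp only [Function.comp_apply]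
    congr 1
    omega

theorem pvLRowB_spec (k1 k2 : List String) (i : Nat) :
    ∀ (ks : List String) (j0 : Nat) (pd : Nat) (prest : List Nat) (cur : Nat),
      ks = k2.drop j0 →
      pd = (pvADP k1 k2 i j0).length →
      prest = (List.range ks.length).map (fun t => (pvADP k1 k2 i (j0 + 1 + t)).length) →
      cur = (pvADP k1 k2 (i + 1) j0).length →
      pvLRowB (k1.getD i "") ks pd prest cur
        = (List.range ks.length).map (fun t => (pvADP k1 k2 (i + 1) (j0 + 1 + t)).length) := by
  intro ks
  induction ks with
  | nil => intro j0 pd prest cur _ _ _ _; simp [pvLRowB]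
  | cons b ks ih =>
    intro j0 pd prest cur hks hpd hprest hcur
    obtain ⟨hb, hks'⟩ := pvDropCons "" k2 j0 b ks hks
    have hhead : prest.headD 0 = (pvADP k1 k2 i (j0 + 1)).length := by
      subst hprest; simp [List.length_cons, List.range_succ_eq_map]
    have htail : prest.tail = (List.range ks.length).map (fun t => (pvADP k1 k2 i ((j0 + 1) + 1 + t)).length) := by
      subst hprest
      simp only [List.length_cons, List.range_succ_eq_map, List.map_map, List.map_cons, List.tail_cons]
      apply List.map_congr_left
      intro t _
      simp only [Function.comp_apply]
      congr 2
      omega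
    have he : (if k1.getD i "" = b then pd + 1
        else if cur > prest.headD 0 then cur else prest.headD 0)
        = (pvADP k1 k2 (i + 1) (j0 + 1)).length := by
      rw [pvADP, hb, hpd, hcur, hhead]
      split_ifs <;> simp
    simp only [pvLRowB, List.length_cons, List.range_succ_eq_map, List.map_cons, List.map_map]
    refine List.cons_eq_cons.mpr ⟨by simpa using he, ?_⟩
    rw [ih (j0 + 1) (prest.headD 0) prest.tail _ hks' hhead htail (by rw [he])]
    apply List.map_congr_left
    intro t _
    simp only [Function.comp_apply]
    congr 2
    omega

theorem pvLastRowA_spec (k1 k2 : List String) :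
    ∀ (rest : List String) (i : Nat) (prev : List (List String)),
      rest = k1.drop i →
      prev = (List.range (k2.length + 1)).map (fun j => pvADP k1 k2 i j) →
      pvLastRowA k2 rest prev
        = (List.range (k2.length + 1)).map (fun j => pvADP k1 k2 (i + rest.length) j) := by
  intro rest
  induction rest with
  | nil => intro i prev h1 h2; simpa [pvLastRowA] using h2
  | cons a rest ih =>
    intro i prev hrest hprev
    obtain ⟨ha, hrest'⟩ := pvDropCons "" k1 i a rest hrest
    have hhead : prev.headD [] = pvADP k1 k2 i 0 := by
      subst hprev; simp [List.range_succ_eq_map, pvADP_zero_right]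
    have htail : prev.tail = (List.range k2.length).map (fun t => pvADP k1 k2 i (0 + 1 + t)) := by
      subst hprev
      simp only [List.range_succ_eq_map, List.map_map, List.map_cons, List.tail_cons]
      apply List.map_congr_left
      intro t _
      simp only [Function.comp_apply]
      congr 1
      omega
    have hrow := pvRowA_spec k1 k2 i k2 0 (prev.headD []) prev.tail []
      (by simp) hhead htail (by rw [pvADP_zero_right])
    rw [← ha] at *
    simp only [pvLastRowA]
    rw [ih (i + 1) _ hrest' ?_]
    · apply List.map_congr_left; intro j _; congr 1; simp [List.length_cons]; omega
    · rw [hrow, List.range_succ_eq_map, List.map_cons, List.map_map]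
      refine List.cons_eq_cons.mpr ⟨(pvADP_zero_right k1 k2 (i+1)).symm, ?_⟩
      apply List.map_congr_left
      intro t _
      simp only [Function.comp_apply]
      congr 1
      omega

theorem pvLRow_zero (k1 k2 : List String) : pvLRow k1 k2 0 = List.replicate (k2.length + 1) 0 := by
  simp [pvLRow, pvADP_zero_left, List.map_const']

theorem pvRowsB_spec (k1 k2 : List String) :
    ∀ (rest : List String) (i : Nat) (acc : List (List Nat)),
      rest = k1.drop i →
      acc = ((List.range (i + 1)).map (pvLRow k1 k2)).reverse →
      pvRowsB k2 rest acc = ((List.range (i + rest.length + 1)).map (pvLRow k1 k2)).reverse := by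
  intro rest
  induction rest with
  | nil => intro i acc h1 h2; simpa [pvRowsB] using h2
  | cons a rest ih =>
    intro i acc hrest hacc
    obtain ⟨ha, hrest'⟩ := pvDropCons "" k1 i a rest hrest
    have hheadacc : acc.headD [] = pvLRow k1 k2 i := by
      subst hacc
      rw [List.range_succ, List.map_append, List.reverse_append]
      simp
    have hhead : (acc.headD []).headD 0 = (pvADP k1 k2 i 0).length := by
      rw [hheadacc]; simp [pvLRow, List.range_succ_eq_map]
    have htail : (acc.headD []).tail = (List.range k2.length).map (fun t => (pvADP k1 k2 i (0 + 1 + t)).length) := by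
      rw [hheadacc]
      simp only [pvLRow, List.range_succ_eq_map, List.map_map, List.map_cons, List.tail_cons]
      apply List.map_congr_left
      intro t _
      simp only [Function.comp_apply]
      congr 2
      omega
    have hrow := pvLRowB_spec k1 k2 i k2 0 ((acc.headD []).headD 0) (acc.headD []).tail 0
      (by simp) hhead htail (by rw [pvADP_zero_right]; rfl)
    rw [← ha] at *
    simp only [pvRowsB]
    rw [ih (i + 1) _ hrest' ?_]
    · rw [List.length_cons, show i + (rest.length + 1) = i + 1 + rest.length by omega]
    · rw [hrow]
      rw [List.range_succ (n := i + 1), List.map_append, List.reverse_append]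
      simp only [List.map_cons, List.reverse_cons, List.reverse_nil, List.nil_append, List.map_nil,
        List.singleton_append]
      rw [← hacc]
      refine List.cons_eq_cons.mpr ⟨?_, rfl⟩
      rw [pvLRow, List.range_succ_eq_map, List.map_cons, List.map_map]
      refine List.cons_eq_cons.mpr ⟨by rw [pvADP_zero_right]; rfl, ?_⟩
      apply List.map_congr_left
      intro t _
      simp only [Function.comp_apply]
      congr 2
      omega

theorem pvRows_getD (k1 k2 : List String) (rows : List (List Nat))
    (hrows : rows = (List.range (k1.length + 1)).map (pvLRow k1 k2)) (t : Nat) (ht : t ≤ k1.length) :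
    rows.getD t [] = pvLRow k1 k2 t := by
  subst hrows
  simp [List.getD_eq_getElem?_getD, Nat.lt_succ_of_le ht]

theorem pvLRow_getD (k1 k2 : List String) (i j : Nat) (hj : j ≤ k2.length) :
    (pvLRow k1 k2 i).getD j 0 = (pvADP k1 k2 i j).length := by
  simp [pvLRow, List.getD_eq_getElem?_getD, Nat.lt_succ_of_le hj]

theorem pvBackB_spec (k1 k2 : List String) (rows : List (List Nat))
    (hrows : rows = (List.range (k1.length + 1)).map (pvLRow k1 k2)) :
    ∀ (i j : Nat), i ≤ k1.length → j ≤ k2.length →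
      pvBackB k1 k2 rows i j = (pvADP k1 k2 i j).reverse := by
  suffices H : ∀ (s i j : Nat), i + j ≤ s → i ≤ k1.length → j ≤ k2.length →
      pvBackB k1 k2 rows i j = (pvADP k1 k2 i j).reverse by
    exact fun i j hi hj => H (i + j) i j le_rfl hi hj
  intro s
  induction s with
  | zero =>
    intro i j hs hi hj
    have : i = 0 := by omega
    subst this
    simp [pvBackB, pvADP]
  | succ s ih =>
    intro i j hs hi hj
    cases i with
    | zero => simp [pvBackB, pvADP]
    | succ i =>
      cases j with
      | zero => simp [pvBackB, pvADP]
      | succ j =>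
        have e1 : (rows.getD (i + 1) []).getD j 0 = (pvADP k1 k2 (i + 1) j).length := by
          rw [pvRows_getD k1 k2 rows hrows (i + 1) hi, pvLRow_getD k1 k2 (i + 1) j (by omega)]
        have e2 : (rows.getD i []).getD (j + 1) 0 = (pvADP k1 k2 i (j + 1)).length := by
          rw [pvRows_getD k1 k2 rows hrows i (by omega), pvLRow_getD k1 k2 i (j + 1) hj]
        rw [pvBackB, pvADP, e1, e2]
        split_ifs with h1 h2
        · rw [ih i j (by omega) (by omega) (by omega)]
          simp
        · exact ih (i + 1) j (by omega) hi (by omega)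
        · exact ih i (j + 1) (by omega) (by omega) hj

theorem pvScan_eq (lcs : List String) : ∀ (ws : List (List String)) (i : Nat),
    pvScanA lcs ws i = pvScanB lcs ws i := by
  intro ws
  induction ws with
  | nil => intro i; rfl
  | cons w ws ih =>
    intro i
    simp only [pvScanA, pvScanB, pvKeyA, pvKeyB, ih]
    rfl

theorem pv_main (arr1 arr2 : List (List String)) :
    longest_common_words arr1 arr2 = longest_common_words_alt arr1 arr2 := by
  unfold longest_common_words longest_common_words_alt
  rw [show pvKeyB = pvKeyA from rfl]
  set k1 := arr1.map pvKeyA with hk1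
  set k2 := arr2.map pvKeyA with hk2
  have hm : arr1.length = k1.length := by rw [hk1]; simp
  have hn : arr2.length = k2.length := by rw [hk2]; simp
  -- A's final row and dp[m][n]
  have hlast := pvLastRowA_spec k1 k2 k1 0 (List.replicate (k2.length + 1) []) (by simp)
    (by simp [pvADP_zero_left, List.map_const'])
  have hlcsA : (PySem.List.pyGet? (pvLastRowA k2 k1 (List.replicate (k2.length + 1) []))
      (Int.ofNat k2.length)).getD [] = pvADP k1 k2 k1.length k2.length := by
    rw [hlast]
    rw [show (Int.ofNat k2.length) = ((k2.length : Nat) : Int) from rfl, PySem.List.pyGet?_natCast]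
    simp
  -- B's table and backtrack
  have hrows : (pvRowsB k2 k1 [List.replicate (k2.length + 1) 0]).reverse
      = (List.range (k1.length + 1)).map (pvLRow k1 k2) := by
    rw [pvRowsB_spec k1 k2 k1 0 [List.replicate (k2.length + 1) 0] (by simp)
      (by simp [pvLRow_zero]), List.reverse_reverse]
    simp
  have hlcsB : (pvBackB k1 k2 ((pvRowsB k2 k1 [List.replicate (k2.length + 1) 0]).reverse)
      arr1.length arr2.length).reverse = pvADP k1 k2 k1.length k2.length := by
    rw [hm, hn, pvBackB_spec k1 k2 _ hrows k1.length k2.length le_rfl le_rfl,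
      List.reverse_reverse]
  simp only [← hm, ← hn] at hlcsA hlcsB ⊢
  rw [hlcsA, hlcsB, pvScan_eq]

-- ===== VERDICT (by name: the statement is the Claim_ definition above) =====
theorem longest_common_words_spec : Claim_equal_longest_common_words := by
  intro arr1 arr2 _ _
  unfold Spec_longest_common_words
  exact pv_main arr1 arr2
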